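-- pv_equiv track=rewrite | github.com/Salome2010/IntroProgramacion | recu.py | longitudUnosMax
-- ===== SOURCE A (Python) =====
-- def longitudUnosMax(lista:[int]) -> int:
--     longitud:int = 0
--     longitudMax:int = 0
--     indice:int = 0
--     for i in range(len(lista)):
--         if lista[i] == 1:
--             if longitud==0:
--                 indice=i
--             longitud+=1
--             if longitud > longitudMax:
--                 longitudMax = longitud
--         else:
--             longitud = 0
--     return longitudMax
-- ===== SOURCE B (Python) =====
-- from itertools import groupby
--
--
-- def longitudUnosMax(lista: [int]) -> int:
--     return max((sum(1 for _ in g) for k, g in groupby(lista) if k == 1), default=0)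
-- ===== Notes on version B (the rewrite author's own statement) =====
-- stated objective: idiomatic
-- what changed: Replaces the manual running-counter/running-max scan with a segment-then-reduce decomposition: split the list into maximal runs with itertools.groupby, then take the max length among runs of 1s (default 0).
import Mathlib
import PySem

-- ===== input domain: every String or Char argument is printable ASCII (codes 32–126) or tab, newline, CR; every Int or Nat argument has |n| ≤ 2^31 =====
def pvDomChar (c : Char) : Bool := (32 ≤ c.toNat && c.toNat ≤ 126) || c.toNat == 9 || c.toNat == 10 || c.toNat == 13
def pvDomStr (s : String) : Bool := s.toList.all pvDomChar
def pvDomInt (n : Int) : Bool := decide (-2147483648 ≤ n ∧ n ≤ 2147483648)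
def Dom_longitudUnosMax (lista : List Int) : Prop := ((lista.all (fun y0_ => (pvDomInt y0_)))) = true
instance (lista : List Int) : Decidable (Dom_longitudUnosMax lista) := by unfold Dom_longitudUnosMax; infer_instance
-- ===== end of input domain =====

-- B groups the list into maximal runs and takes the max length among runs of 1s; same return value as A, no speed claim.

-- ===== PORT A =====
-- loop body of A; state = (longitud, longitudMax, indice).  lista[i] is always in range
-- in A's loop (i ∈ range(len(lista))), so pyGetD with default 0 is exact here.
def lumStepA (lista : List Int) (st : Int × Int × Int) (i : Int) : Int × Int × Int :=
  if PySem.List.pyGetD lista i 0 = 1 then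
    let indice := if st.1 = 0 then i else st.2.2
    let longitud := st.1 + 1
    let longitudMax := if longitud > st.2.1 then longitud else st.2.1
    (longitud, longitudMax, indice)
  else
    (0, st.2.1, st.2.2)

def longitudUnosMax (lista : List Int) : Int :=
  ((PySem.List.pyRange 0 (PySem.List.len lista) 1).foldl (lumStepA lista) (0, 0, 0)).2.1

-- ===== PORT B =====
-- port of itertools.groupby fused with the per-group length: the (key, length) pairs of the
-- maximal runs of consecutive equal elements, in order.
def lumRuns : List Int → List (Int × Int)
  | [] => []
  | x :: xs =>
    match lumRuns xs with
    | (k, n) :: rest => if k = x then (k, n + 1) :: rest else (x, 1) :: (k, n) :: rest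
    | [] => [(x, 1)]

-- max(lengths of runs whose key == 1, default=0)
def longitudUnosMax_alt (lista : List Int) : Int :=
  ((lumRuns lista).filterMap (fun p => if p.1 = 1 then some p.2 else none)).foldl max 0

-- ===== PRECONDITION & SPEC =====
def Spec_longitudUnosMax (lista : List Int) (out : Int) : Prop := out = longitudUnosMax_alt lista
instance (lista : List Int) (out : Int) : Decidable (Spec_longitudUnosMax lista out) := by unfold Spec_longitudUnosMax; infer_instance

-- ===== CLAIM (what is proved, stated in full; the proofs are below) =====
def Claim_equal_longitudUnosMax : Prop := ∀ (lista : List Int), Dom_longitudUnosMax lista → Spec_longitudUnosMax lista (longitudUnosMax lista)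

-- ===== LEMMAS AND PROOFS =====

-- index-free projection of A's loop body (indice is write-only w.r.t. the returned value)
def lumStepE (st : Int × Int) (x : Int) : Int × Int :=
  if x = 1 then (st.1 + 1, max st.2 (st.1 + 1)) else (0, st.2)

-- A's result from state (l, m) on the remaining list, with m factored out
def lumBestA : Int → List Int → Int
  | l, [] => l
  | l, x :: xs => if x = 1 then lumBestA (l + 1) xs else max l (lumBestA 0 xs)

-- B's reduction, foldr form
def lumN (ps : List (Int × Int)) : Int :=
  (ps.filterMap (fun p => if p.1 = 1 then some p.2 else none)).foldr max 0

theorem lumProj (lista : List Int) :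
    ∀ (js : List Int) (l m idx : Int),
      (((js.foldl (lumStepA lista) (l, m, idx)).1, (js.foldl (lumStepA lista) (l, m, idx)).2.1)
        = (js.map (fun j => PySem.List.pyGetD lista j 0)).foldl lumStepE (l, m)) := by
  intro js
  induction js with
  | nil => intro l m idx; rfl
  | cons j js ih =>
    intro l m idx
    simp only [List.foldl_cons, List.map_cons]
    by_cases h : PySem.List.pyGetD lista j 0 = 1
    · simp only [lumStepA, lumStepE, h, reduceIte]
      have hmx : (if l + 1 > m then l + 1 else m) = max m (l + 1) := by
        simp only [Int.max_def]; split_ifs <;> linarith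
      rw [ih, hmx]
    · simp only [lumStepA, lumStepE, if_neg h]
      rw [ih]

theorem lumBestA_ge : ∀ (xs : List Int) (l : Int), l ≤ lumBestA l xs := by
  intro xs
  induction xs with
  | nil => intro l; simp [lumBestA]
  | cons x xs ih =>
    intro l
    simp only [lumBestA]
    by_cases h : x = 1
    · simp only [h, reduceIte]
      have := ih (l + 1); omega
    · simp only [if_neg h]; exact le_max_left _ _

theorem lumMainA : ∀ (xs : List Int) (l m : Int), 0 ≤ l → l ≤ m →
    (xs.foldl lumStepE (l, m)).2 = max m (lumBestA l xs) := by
  intro xs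
  induction xs with
  | nil => intro l m _ hlm; simp [lumBestA]; omega
  | cons x xs ih =>
    intro l m hl hlm
    simp only [List.foldl_cons, lumStepE, lumBestA]
    by_cases h : x = 1
    · simp only [h, reduceIte]
      rw [ih (l + 1) (max m (l + 1)) (by omega) (by omega)]
      have := lumBestA_ge xs (l + 1)
      omega
    · simp only [if_neg h]
      rw [ih 0 m (by omega) (by omega)]
      have := lumBestA_ge xs 0
      omega

theorem lumN_nonneg : ∀ (ps : List (Int × Int)), 0 ≤ lumN ps := by
  intro ps
  induction ps with
  | nil => simp [lumN]
  | cons p ps ih =>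
    simp only [lumN, List.filterMap_cons]
    by_cases h : p.1 = 1
    · simp only [h, reduceIte, List.foldr_cons]
      simp only [lumN] at ih
      omega
    · simp only [if_neg h]; exact ih

theorem lumRuns_nil : ∀ (xs : List Int), lumRuns xs = [] → xs = [] := by
  intro xs h
  cases xs with
  | nil => rfl
  | cons x xs =>
    exfalso
    simp only [lumRuns] at h
    cases hr : lumRuns xs with
    | nil => rw [hr] at h; simp at h
    | cons p rest =>
      rw [hr] at h
      obtain ⟨k, n⟩ := p
      by_cases hk : k = x <;> simp [hk] at h

theorem lumC : ∀ (xs : List Int) (l : Int), 0 ≤ l →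
    lumBestA l xs = (match lumRuns xs with
      | (k, n) :: rest => if k = 1 then max (l + n) (lumN rest) else max l (lumN ((k, n) :: rest))
      | [] => l) := by
  intro xs
  induction xs with
  | nil => intro l _; rfl
  | cons x xs ih =>
    intro l hl
    simp only [lumBestA, lumRuns]
    cases hr : lumRuns xs with
    | nil =>
      have hxs := lumRuns_nil xs hr
      subst hxs
      by_cases h : x = 1
      · subst h
        simp only [reduceIte, lumBestA, lumN, List.filterMap_nil, List.foldr_nil]
        simp only [Int.max_def]; split_ifs <;> linarith
      · simp only [if_neg h, lumBestA, lumN, List.filterMap_cons, List.filterMap_nil,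
          List.foldr_nil]
    | cons p rest =>
      obtain ⟨k, n⟩ := p
      have ihx := ih 0 (by omega)
      rw [hr] at ihx
      by_cases h : x = 1
      · subst h
        simp only [reduceIte]
        have ihl := ih (l + 1) (by omega)
        rw [hr] at ihl
        by_cases hk : k = 1
        · subst hk
          simp only [reduceIte] at ihl ⊢
          rw [ihl]; congr 1; omega
        · simp only [if_neg hk] at ihl ⊢
          rw [ihl]
          have := lumN_nonneg ((k, n) :: rest)
          simp only [Int.max_def]; split_ifs <;> linarith
      · simp only [if_neg h]
        rw [ihx]
        by_cases hk : k = x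
        · subst hk
          simp only [reduceIte, if_neg h]
          have h1 : lumN ((k, n + 1) :: rest) = lumN rest := by
            simp [lumN, if_neg h]
          have h2 : lumN ((k, n) :: rest) = lumN rest := by
            simp [lumN, if_neg h]
          by_cases hk1 : k = 1
          · exact absurd hk1 h
          · simp only [h1, h2]
            have := lumN_nonneg rest
            simp only [Int.max_def]; split_ifs <;> linarith
        · simp only [if_neg hk]
          have h3 : lumN ((x, 1) :: (k, n) :: rest) = lumN ((k, n) :: rest) := by
            simp [lumN, if_neg h]
          by_cases hk1 : k = 1
          · subst hk1
            simp only [reduceIte, if_neg h, h3]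
            have h4 : lumN ((1, n) :: rest) = max n (lumN rest) := by
              simp [lumN]
            rw [h4]
            simp only [Int.max_def]; split_ifs <;> linarith
          · simp only [if_neg hk1, if_neg h, h3]
            have := lumN_nonneg ((k, n) :: rest)
            simp only [Int.max_def]; split_ifs <;> linarith

theorem lumFoldlMax : ∀ (L : List Int) (a : Int), 0 ≤ a →
    L.foldl max a = max a (L.foldr max 0) := by
  intro L
  induction L with
  | nil => intro a ha; simp; omega
  | cons x L ih =>
    intro a ha
    simp only [List.foldl_cons, List.foldr_cons]
    rw [ih (max a x) (by omega)]
    omega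

-- ===== VERDICT (by name: the statement is the Claim_ definition above) =====
theorem longitudUnosMax_spec : Claim_equal_longitudUnosMax := by
  intro lista _
  unfold Spec_longitudUnosMax longitudUnosMax longitudUnosMax_alt
  have hp := congrArg Prod.snd (lumProj lista (PySem.List.pyRange 0 (PySem.List.len lista) 1) 0 0 0)
  simp only at hp
  rw [hp, PySem.List.map_pyGetD_pyRange_zero]
  rw [lumMainA lista 0 0 (by omega) (by omega)]
  rw [lumFoldlMax _ 0 (by omega)]
  have hc := lumC lista 0 (by omega)
  cases hr : lumRuns lista with
  | nil =>
    rw [hr] at hc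
    simp only at hc
    rw [hc]
    simp
  | cons p rest =>
    obtain ⟨k, n⟩ := p
    rw [hr] at hc
    simp only at hc
    by_cases hk : k = 1
    · subst hk
      simp only [reduceIte] at hc
      rw [hc]
      have h4 : lumN ((1, n) :: rest) = max n (lumN rest) := by
        simp [lumN]
      have := lumN_nonneg rest
      have h5 : ((((1:Int), n) :: rest).filterMap (fun p => if p.1 = 1 then some p.2 else none)).foldr max 0 = lumN (((1:Int), n) :: rest) := rfl
      rw [h5, h4]
      simp only [Int.max_def]; split_ifs <;> linarith
    · simp only [if_neg hk] at hc
      rw [hc]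
      have h5 : (((k, n) :: rest).filterMap (fun p => if p.1 = 1 then some p.2 else none)).foldr max 0 = lumN ((k, n) :: rest) := rfl
      rw [h5]
      have := lumN_nonneg ((k, n) :: rest)
      simp only [Int.max_def]; split_ifs <;> linarith
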